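-- pv_equiv track=rewrite | github.com/pypi-data/pypi-mirror-55 | packages/bomail/bomail-0.9.4.1-py3-none-any.whl/bomail/util/tags.py | get_tagset
-- ===== SOURCE A (Python) =====
-- def clean_tag(t):
--   return t.strip().replace(" ","-").replace(",","-")
--
-- def get_tagset(unclean_taglist, include_folders=False):
--   new = set()
--   if not include_folders:
--     redundant = set()
--   for t in unclean_taglist:
--     w = clean_tag(t)
--     if len(w) > 0:
--       new.add(w)
--       for i,s in enumerate(w):
--         if s == "/":
--           if include_folders:
--             new.add(w[:i])
--           else:
--             redundant.add(w[:i])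
--   if not include_folders:
--     for w in redundant:
--       new.discard(w)
--   return new
-- ===== SOURCE B (Python) =====
-- def clean_tag(t):
--   return t.strip().replace(" ","-").replace(",","-")
--
-- def folders(w):
--   # cumulative '/'-joins of w.split('/'): all proper slash-prefixes of w
--   parts = w.split('/')
--   acc = []
--   pre = parts[0]
--   for part in parts[1:]:
--     acc.append(pre)
--     pre = pre + '/' + part
--   return acc
--
-- def get_tagset(unclean_taglist, include_folders=False):
--   cleaned = [w for w in map(clean_tag, unclean_taglist) if w]
--   if include_folders:
--     return {p for w in cleaned for p in [w, *folders(w)]}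
--   return {w for w in cleaned if not any(v.startswith(w + '/') for v in cleaned)}
-- ===== Notes on version B (the rewrite author's own statement) =====
-- stated objective: simpler
-- what changed: A runs one loop that scans every word character by character, slicing out a prefix at each '/' into either the result set or a 'redundant' set which is discarded at the end; B instead derives folder prefixes as cumulative '/'-joins of w.split('/') (only when include_folders is set), and otherwise never builds prefixes at all: it keeps a cleaned word exactly when no cleaned word starts with it plus '/'.
import Mathlib
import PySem

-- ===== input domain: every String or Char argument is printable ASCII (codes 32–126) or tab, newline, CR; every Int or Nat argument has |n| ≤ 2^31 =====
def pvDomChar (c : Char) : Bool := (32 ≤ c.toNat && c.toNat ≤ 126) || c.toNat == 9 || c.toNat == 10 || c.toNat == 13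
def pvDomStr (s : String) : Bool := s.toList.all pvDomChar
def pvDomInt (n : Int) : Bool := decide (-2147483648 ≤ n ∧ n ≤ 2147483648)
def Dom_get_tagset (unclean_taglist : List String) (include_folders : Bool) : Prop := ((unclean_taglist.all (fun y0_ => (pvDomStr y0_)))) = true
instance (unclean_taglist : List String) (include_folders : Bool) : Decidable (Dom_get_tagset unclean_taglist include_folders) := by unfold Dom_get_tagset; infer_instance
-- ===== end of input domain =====

-- B drops A's per-character scan and redundant-set bookkeeping: folder prefixes come from
-- split('/') cumulative joins, and without include_folders a word is kept iff no cleaned word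
-- starts with it plus '/'; objective: simpler (no speed claim).

-- ===== PORT A =====
def clean_tag (t : String) : String :=
  PySem.Str.replace (PySem.Str.replace (PySem.Str.strip t) " " "-") "," "-"

def get_tagset (unclean_taglist : List String) (include_folders : Bool) : List String :=
  let res := unclean_taglist.foldl (fun (st : PySem.Set String × PySem.Set String) t =>
    let w := clean_tag t
    if PySem.Str.len w > 0 then
      let st1 : PySem.Set String × PySem.Set String := (PySem.Set.add st.1 w, st.2)
      (PySem.List.enumerate w.toList 0).foldl (fun st p =>
        if p.2 = '/' then
          (if include_folders then (PySem.Set.add st.1 (PySem.Str.slice w none (some p.1)), st.2)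
           else (st.1, PySem.Set.add st.2 (PySem.Str.slice w none (some p.1))))
        else st) st1
    else st) (PySem.Set.empty, PySem.Set.empty)
  if include_folders then res.1
  else res.2.foldl (fun n w => PySem.Set.discard n w) res.1

-- ===== PORT B =====
-- parts = w.split('/') is never empty for the nonempty separator "/", so the fallback arm is unreachable.
def folders (w : String) : List String :=
  match PySem.Str.split? w "/" with
  | some (p0 :: ps) =>
      (ps.foldl (fun (st : List String × String) part =>
        (st.1 ++ [st.2], st.2 ++ "/" ++ part)) ([], p0)).1
  | _ => []

def get_tagset_alt (unclean_taglist : List String) (include_folders : Bool) : List String :=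
  let cleaned := (unclean_taglist.map clean_tag).filter (fun w => w ≠ "")
  if include_folders then
    PySem.Set.ofList (cleaned.flatMap (fun w => w :: folders w))
  else
    PySem.Set.ofList (cleaned.filter (fun w =>
      !(cleaned.any (fun v => PySem.Str.startswith v (w ++ "/")))))

-- ===== PRECONDITION & SPEC =====
def Spec_get_tagset (unclean_taglist : List String) (include_folders : Bool) (out : List String) : Prop := out = get_tagset_alt unclean_taglist include_folders
instance (unclean_taglist : List String) (include_folders : Bool) (out : List String) : Decidable (Spec_get_tagset unclean_taglist include_folders out) := by unfold Spec_get_tagset; infer_instance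

-- ===== CLAIM (what is proved, stated in full; the proofs are below) =====
def Claim_equal_get_tagset : Prop := ∀ (unclean_taglist : List String) (include_folders : Bool), Dom_get_tagset unclean_taglist include_folders → Spec_get_tagset unclean_taglist include_folders (get_tagset unclean_taglist include_folders)

-- ===== LEMMAS AND PROOFS =====

-- recursive description of A's prefix collection (all w[:i] with w[i] = '/')
def prefRec : List Char → List Char → List String
  | [], _ => []
  | c :: cs, pre => if c = '/' then String.ofList pre :: prefRec cs (pre ++ [c]) else prefRec cs (pre ++ [c])

theorem slice_pre (w : String) (pre cs : List Char) (h : w.toList = pre ++ cs) :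
    PySem.Str.slice w none (some (pre.length : Int)) = String.ofList pre := by
  apply String.toList_inj.mp
  simp [PySem.List.slice_to_natCast, h]

theorem innerF (w : String) : ∀ (cs pre : List Char), w.toList = pre ++ cs →
    ∀ (s r : PySem.Set String),
    (PySem.List.enumerate cs (pre.length : Int)).foldl (fun (st : PySem.Set String × PySem.Set String) p =>
        if p.2 = '/' then (st.1, PySem.Set.add st.2 (PySem.Str.slice w none (some p.1))) else st) (s, r)
    = (s, PySem.Set.update r (prefRec cs pre)) := by
  intro cs
  induction cs with
  | nil => intro pre _ s r; simp [PySem.List.enumerate_nil, prefRec, PySem.Set.update]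
  | cons c cs ih =>
    intro pre h s r
    have h' : w.toList = (pre ++ [c]) ++ cs := by simpa using h
    have hlen : (pre.length : Int) + 1 = ((pre ++ [c]).length : Int) := by simp
    rw [PySem.List.enumerate_cons, List.foldl_cons]
    by_cases hc : c = '/'
    · subst hc
      have hsl : PySem.Str.slice w none (some (pre.length : Int)) = String.ofList pre :=
        slice_pre w pre ('/' :: cs) h
      simp only [ite_true, hsl, hlen]
      rw [ih (pre ++ ['/']) h']
      simp [prefRec, PySem.Set.update_cons]
    · simp only [hc, ite_false, hlen]
      rw [ih (pre ++ [c]) h']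
      simp [prefRec, hc]

theorem innerT (w : String) : ∀ (cs pre : List Char), w.toList = pre ++ cs →
    ∀ (s r : PySem.Set String),
    (PySem.List.enumerate cs (pre.length : Int)).foldl (fun (st : PySem.Set String × PySem.Set String) p =>
        if p.2 = '/' then (PySem.Set.add st.1 (PySem.Str.slice w none (some p.1)), st.2) else st) (s, r)
    = (PySem.Set.update s (prefRec cs pre), r) := by
  intro cs
  induction cs with
  | nil => intro pre _ s r; simp [PySem.List.enumerate_nil, prefRec, PySem.Set.update]
  | cons c cs ih =>
    intro pre h s r
    have h' : w.toList = (pre ++ [c]) ++ cs := by simpa using h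
    have hlen : (pre.length : Int) + 1 = ((pre ++ [c]).length : Int) := by simp
    rw [PySem.List.enumerate_cons, List.foldl_cons]
    by_cases hc : c = '/'
    · subst hc
      have hsl : PySem.Str.slice w none (some (pre.length : Int)) = String.ofList pre :=
        slice_pre w pre ('/' :: cs) h
      simp only [ite_true, hsl, hlen]
      rw [ih (pre ++ ['/']) h']
      simp [prefRec, PySem.Set.update_cons]
    · simp only [hc, ite_false, hlen]
      rw [ih (pre ++ [c]) h']
      simp [prefRec, hc]

theorem innerF0 (w : String) (s r : PySem.Set String) :
    (PySem.List.enumerate w.toList 0).foldl (fun (st : PySem.Set String × PySem.Set String) p =>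
        if p.2 = '/' then (st.1, PySem.Set.add st.2 (PySem.Str.slice w none (some p.1))) else st) (s, r)
    = (s, PySem.Set.update r (prefRec w.toList [])) := by
  have h0 := innerF w w.toList [] (by simp) s r
  simpa only [List.length_nil, Int.natCast_zero] using h0

theorem innerT0 (w : String) (s r : PySem.Set String) :
    (PySem.List.enumerate w.toList 0).foldl (fun (st : PySem.Set String × PySem.Set String) p =>
        if p.2 = '/' then (PySem.Set.add st.1 (PySem.Str.slice w none (some p.1)), st.2) else st) (s, r)
    = (PySem.Set.update s (prefRec w.toList []), r) := by
  have h0 := innerT w w.toList [] (by simp) s r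
  simpa only [List.length_nil, Int.natCast_zero] using h0

theorem len_pos_iff (w : String) : PySem.Str.len w > 0 ↔ w ≠ "" := by
  constructor
  · intro h he; subst he; simp at h
  · intro h
    have h1 : w.toList ≠ [] := by
      intro hc; exact h (String.toList_inj.mp (by simp [hc]))
    have h2 : 0 < w.toList.length := List.length_pos_iff.mpr h1
    simpa using h2

def wordsOf (ts : List String) : List String := (ts.map clean_tag).filter (fun w => w ≠ "")

theorem wordsOf_cons_pos (t : String) (ts : List String) (hw : clean_tag t ≠ "") :
    wordsOf (t :: ts) = clean_tag t :: wordsOf ts := by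
  simp [wordsOf, hw]

theorem wordsOf_cons_neg (t : String) (ts : List String) (hw : clean_tag t = "") :
    wordsOf (t :: ts) = wordsOf ts := by
  simp [wordsOf, hw]

theorem outerSimpF : ∀ (ts : List String) (s r : PySem.Set String),
    ts.foldl (fun (st : PySem.Set String × PySem.Set String) t =>
      if PySem.Str.len (clean_tag t) > 0 then
        (PySem.Set.add st.1 (clean_tag t), PySem.Set.update st.2 (prefRec (clean_tag t).toList []))
      else st) (s, r)
    = (PySem.Set.update s (wordsOf ts),
       PySem.Set.update r ((wordsOf ts).flatMap (fun w => prefRec w.toList []))) := by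
  intro ts
  induction ts with
  | nil =>
    intro s r
    simp only [List.foldl_nil, wordsOf, List.map_nil, List.filter_nil, List.flatMap_nil,
      PySem.Set.update_nil]
  | cons t ts ih =>
    intro s r
    rw [List.foldl_cons]
    by_cases hw : clean_tag t ≠ ""
    · have hlen : PySem.Str.len (clean_tag t) > 0 := (len_pos_iff _).mpr hw
      rw [if_pos hlen, ih, wordsOf_cons_pos t ts hw]
      rw [List.flatMap_cons, PySem.Set.update_cons, PySem.Set.update_append]
    · have hw' : clean_tag t = "" := by simpa using hw
      have hlen : ¬ (PySem.Str.len (clean_tag t) > 0) := by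
        rw [len_pos_iff]; simpa using hw
      rw [if_neg hlen, ih, wordsOf_cons_neg t ts hw']

theorem outerSimpT : ∀ (ts : List String) (s r : PySem.Set String),
    ts.foldl (fun (st : PySem.Set String × PySem.Set String) t =>
      if PySem.Str.len (clean_tag t) > 0 then
        (PySem.Set.update (PySem.Set.add st.1 (clean_tag t)) (prefRec (clean_tag t).toList []), st.2)
      else st) (s, r)
    = (PySem.Set.update s ((wordsOf ts).flatMap (fun w => w :: prefRec w.toList [])), r) := by
  intro ts
  induction ts with
  | nil =>
    intro s r
    simp only [List.foldl_nil, wordsOf, List.map_nil, List.filter_nil, List.flatMap_nil,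
      PySem.Set.update_nil]
  | cons t ts ih =>
    intro s r
    rw [List.foldl_cons]
    by_cases hw : clean_tag t ≠ ""
    · have hlen : PySem.Str.len (clean_tag t) > 0 := (len_pos_iff _).mpr hw
      rw [if_pos hlen, ih, wordsOf_cons_pos t ts hw]
      rw [List.flatMap_cons, List.cons_append, PySem.Set.update_cons, PySem.Set.update_append]
    · have hw' : clean_tag t = "" := by simpa using hw
      have hlen : ¬ (PySem.Str.len (clean_tag t) > 0) := by
        rw [len_pos_iff]; simpa using hw
      rw [if_neg hlen, ih, wordsOf_cons_neg t ts hw']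

theorem discard_foldl : ∀ (bad n : List String),
    bad.foldl (fun n w => PySem.Set.discard n w) n
    = n.filter (fun x => !(PySem.Set.contains bad x)) := by
  intro bad
  induction bad with
  | nil => intro n; simp [PySem.Set.contains]
  | cons b bad ih =>
    intro n
    rw [List.foldl_cons, ih]
    show (PySem.Set.discard n b).filter _ = _
    rw [show PySem.Set.discard n b = n.filter (fun y => !(y == b)) from rfl,
      List.filter_filter]
    apply List.filter_congr
    intro x _
    by_cases hx : x = b <;> simp [PySem.Set.contains, hx]

theorem discard_filter (s : List String) (x : String) (p : String → Bool) :
    PySem.Set.discard (s.filter p) x = (PySem.Set.discard s x).filter p := by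
  show (s.filter p).filter _ = (s.filter _).filter p
  rw [List.filter_filter, List.filter_filter]
  apply List.filter_congr
  intro y _
  cases hp : p y <;> simp [hp]

theorem ofList_filter (p : String → Bool) : ∀ (xs : List String),
    PySem.Set.ofList (xs.filter p) = (PySem.Set.ofList xs).filter p := by
  intro xs
  induction xs with
  | nil => simp [PySem.Set.ofList]
  | cons x xs ih =>
    cases hp : p x
    · rw [List.filter_cons_of_neg (by simp [hp]), ih, PySem.Set.ofList_cons]
      rw [List.filter_cons_of_neg (by simp [hp])]
      show _ = ((PySem.Set.ofList xs).filter (fun y => !(y == x))).filter p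
      rw [List.filter_filter]
      apply (List.filter_congr ?_).symm
      intro y _
      cases hy : p y
      · simp [hy]
      · have : y ≠ x := by intro he; rw [he, hp] at hy; exact Bool.false_ne_true hy
        simp [hy, this]
    · rw [List.filter_cons_of_pos (by simp [hp]), PySem.Set.ofList_cons, PySem.Set.ofList_cons,
        List.filter_cons_of_pos (by simp [hp]), ih, discard_filter]

-- ---- B-side: split('/') as structural recursion, and folders = prefRec ----

def mySplit : List Char → List (List Char)
  | [] => [[]]
  | c :: cs =>
    if c = '/' then [] :: mySplit cs
    else match mySplit cs with
      | [] => [[c]]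
      | h :: t => (c :: h) :: t

theorem mySplit_ne_nil (cs : List Char) : mySplit cs ≠ [] := by
  cases cs with
  | nil => simp [mySplit]
  | cons c cs =>
    by_cases hc : c = '/'
    · simp [mySplit, hc]
    · simp only [mySplit, if_neg hc]
      cases mySplit cs <;> simp

def consHead (p : List Char) : List (List Char) → List (List Char)
  | [] => [p]
  | h :: t => (p ++ h) :: t

theorem splitOn_go (fuel : Nat) : ∀ (l cur : List Char) (acc : List (List Char)),
    l.length ≤ fuel →
    PySem.Chars.splitOn.go ['/'] fuel l cur acc
      = acc.reverse ++ consHead cur.reverse (mySplit l) := by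
  induction fuel with
  | zero =>
    intro l cur acc h
    have : l = [] := by simpa using h
    subst this
    simp [PySem.Chars.splitOn.go, mySplit, consHead]
  | succ fuel ih =>
    intro l cur acc h
    cases l with
    | nil => simp [PySem.Chars.splitOn.go, mySplit, consHead]
    | cons c rest =>
      by_cases hc : c = '/'
      · have hp : List.isPrefixOf ['/'] (c :: rest) = true := by simp [hc, List.isPrefixOf]
        rw [show PySem.Chars.splitOn.go ['/'] (fuel + 1) (c :: rest) cur acc
            = PySem.Chars.splitOn.go ['/'] fuel rest [] (cur.reverse :: acc) by
          simp [PySem.Chars.splitOn.go, hp]]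
        rw [ih rest [] (cur.reverse :: acc) (by simpa using h)]
        simp only [mySplit, if_pos hc, List.reverse_cons, List.reverse_nil]
        rcases hms : mySplit rest with _ | ⟨h1, t1⟩
        · exact absurd hms (mySplit_ne_nil rest)
        · simp [consHead]
      · have hp : List.isPrefixOf ['/'] (c :: rest) = false := by
          simp [List.isPrefixOf]; exact fun he => hc he.symm
        rw [show PySem.Chars.splitOn.go ['/'] (fuel + 1) (c :: rest) cur acc
            = PySem.Chars.splitOn.go ['/'] fuel rest (c :: cur) acc by
          simp [PySem.Chars.splitOn.go, hp]]
        rw [ih rest (c :: cur) acc (by simpa using h)]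
        simp only [mySplit, if_neg hc, List.reverse_cons]
        rcases hms : mySplit rest with _ | ⟨h1, t1⟩
        · exact absurd hms (mySplit_ne_nil rest)
        · simp [consHead]

theorem splitOn_eq_mySplit (cs : List Char) :
    PySem.Chars.splitOn cs ['/'] = mySplit cs := by
  rw [show PySem.Chars.splitOn cs ['/'] = PySem.Chars.splitOn.go ['/'] (cs.length + 1) cs [] [] from rfl]
  rw [splitOn_go (cs.length + 1) cs [] [] (by omega)]
  rcases hms : mySplit cs with _ | ⟨h1, t1⟩
  · exact absurd hms (mySplit_ne_nil cs)
  · simp [consHead]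

-- recursive description of B's cumulative-join loop
def foldersGo : List String → String → List String
  | [], _ => []
  | p :: ps, pre => pre :: foldersGo ps (pre ++ "/" ++ p)

theorem folders_foldl (ps : List String) : ∀ (acc : List String) (pre : String),
    (ps.foldl (fun (st : List String × String) part =>
      (st.1 ++ [st.2], st.2 ++ "/" ++ part)) (acc, pre)).1 = acc ++ foldersGo ps pre := by
  induction ps with
  | nil => intro acc pre; simp [foldersGo]
  | cons p ps ih => intro acc pre; simp [foldersGo, ih]

theorem ofList_append_str (a b : List Char) :
    String.ofList a ++ String.ofList b = String.ofList (a ++ b) := by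
  apply String.toList_inj.mp
  simp

theorem slash_toList : ("/" : String).toList = ['/'] := by decide

theorem slash_ofList : ("/" : String) = String.ofList ['/'] := by
  apply String.toList_inj.mp
  simp [slash_toList]

theorem foldersGo_prefRec : ∀ (cs pre : List Char),
    foldersGo (((mySplit cs).tail).map String.ofList) (String.ofList (pre ++ (mySplit cs).headI))
      = prefRec cs pre := by
  intro cs
  induction cs with
  | nil => intro pre; simp [mySplit, foldersGo, prefRec]
  | cons c cs ih =>
    intro pre
    by_cases hc : c = '/'
    · simp only [mySplit, prefRec, hc, ite_true]
      rcases hms : mySplit cs with _ | ⟨h1, t1⟩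
      · exact absurd hms (mySplit_ne_nil cs)
      · have hih := ih (pre ++ ['/'])
        rw [hms] at hih
        simp only [List.tail_cons, List.headI_cons] at hih ⊢
        simp only [List.map_cons, foldersGo]
        congr 1
        · simp
        · rw [← hih]
          congr 1
          rw [slash_ofList, ofList_append_str, ofList_append_str]
          congr 1
          simp
    · simp only [mySplit, prefRec, hc, ite_false]
      rcases hms : mySplit cs with _ | ⟨h1, t1⟩
      · exact absurd hms (mySplit_ne_nil cs)
      · have hih := ih (pre ++ [c])
        rw [hms] at hih
        simp only [List.tail_cons, List.headI_cons] at hih ⊢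
        rw [← hih]
        congr 2
        simp

theorem folders_eq (w : String) : folders w = prefRec w.toList [] := by
  unfold folders
  rw [show PySem.Str.split? w "/"
      = some ((mySplit w.toList).map String.ofList) by
    simp [PySem.Str.split?, PySem.Chars.split?, slash_toList, splitOn_eq_mySplit]]
  rcases hms : mySplit w.toList with _ | ⟨h1, t1⟩
  · exact absurd hms (mySplit_ne_nil w.toList)
  · simp only [List.map_cons]
    rw [folders_foldl]
    have hih := foldersGo_prefRec w.toList []
    rw [hms] at hih
    simpa using hih

-- membership in A's prefix list ↔ a '/'-extension relation on the raw characters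
theorem mem_prefRec : ∀ (cs pre : List Char) (s : String),
    s ∈ prefRec cs pre ↔ ∃ p q, cs = p ++ '/' :: q ∧ s.toList = pre ++ p := by
  intro cs
  induction cs with
  | nil =>
    intro pre s
    simp only [prefRec, List.not_mem_nil, false_iff]
    rintro ⟨p, q, hpq, -⟩
    exact absurd hpq (by simp)
  | cons c cs ih =>
    intro pre s
    by_cases hc : c = '/'
    · subst hc
      simp only [prefRec, ite_true, List.mem_cons, ih]
      constructor
      · rintro (he | ⟨p, q, hpq, hs⟩)
        · exact ⟨[], cs, by simp, by simp [he]⟩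
        · exact ⟨'/' :: p, q, by simp [hpq], by simpa using hs⟩
      · rintro ⟨p, q, hpq, hs⟩
        cases p with
        | nil =>
          left
          apply String.toList_inj.mp
          simpa using hs
        | cons c' p =>
          right
          have h1 : '/' = c' := by
            have := congrArg List.headI hpq
            simpa using this
          have h2 : cs = p ++ '/' :: q := by
            have := congrArg List.tail hpq
            simpa using this
          exact ⟨p, q, h2, by simp [hs, ← h1]⟩
    · simp only [prefRec, if_neg hc, ih]
      constructor
      · rintro ⟨p, q, hpq, hs⟩
        exact ⟨c :: p, q, by simp [hpq], by simpa using hs⟩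
      · rintro ⟨p, q, hpq, hs⟩
        cases p with
        | nil =>
          exfalso
          apply hc
          have := congrArg List.headI hpq
          simpa using this
        | cons c' p =>
          have h1 : c = c' := by
            have := congrArg List.headI hpq
            simpa using this
          have h2 : cs = p ++ '/' :: q := by
            have := congrArg List.tail hpq
            simpa using this
          exact ⟨p, q, h2, by simp [hs, h1]⟩

theorem mem_prefRec_startswith (v w : String) :
    w ∈ prefRec v.toList [] ↔ PySem.Str.startswith v (w ++ "/") = true := by
  rw [mem_prefRec]
  rw [PySem.Str.startswith, PySem.Chars.startswith_iff]
  have htl : (w ++ "/").toList = w.toList ++ ['/'] := by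
    rw [String.toList_append, slash_toList]
  constructor
  · rintro ⟨p, q, hpq, hs⟩
    simp only [List.nil_append] at hs
    exact ⟨q, by simp [htl, hpq, hs]⟩
  · rintro ⟨r, hr⟩
    refine ⟨w.toList, r, ?_, by simp⟩
    rw [← hr, htl]
    simp

-- membership in the flattened prefix list ↔ some cleaned word extends x by '/'
theorem contains_bad_eq (ws : List String) (x : String) :
    PySem.Set.contains (PySem.Set.ofList (ws.flatMap (fun w => prefRec w.toList []))) x
      = ws.any (fun v => PySem.Str.startswith v (x ++ "/")) := by
  rw [Bool.eq_iff_iff, PySem.Set.contains_iff, PySem.Set.mem_ofList, List.mem_flatMap,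
    List.any_eq_true]
  constructor
  · rintro ⟨v, hv, hm⟩
    exact ⟨v, hv, (mem_prefRec_startswith v x).mp hm⟩
  · rintro ⟨v, hv, hm⟩
    exact ⟨v, hv, (mem_prefRec_startswith v x).mpr hm⟩

-- ===== VERDICT (by name: the statement is the Claim_ definition above) =====
theorem get_tagset_spec : Claim_equal_get_tagset := by
  intro ts inc _
  show get_tagset ts inc = get_tagset_alt ts inc
  unfold get_tagset get_tagset_alt
  have hws : ((ts.map clean_tag).filter (fun w => w ≠ "")) = wordsOf ts := rfl
  cases inc
  · -- include_folders = false
    simp only [Bool.false_eq_true, if_false, hws]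
    rw [PySem.List.foldl_congr_mem ts _
      (fun (st : PySem.Set String × PySem.Set String) t =>
        if PySem.Str.len (clean_tag t) > 0 then
          (PySem.Set.add st.1 (clean_tag t), PySem.Set.update st.2 (prefRec (clean_tag t).toList []))
        else st)
      (PySem.Set.empty, PySem.Set.empty)
      (by
        intro st t _
        by_cases hl : PySem.Str.len (clean_tag t) > 0
        · simp only [if_pos hl, Bool.false_eq_true, if_false]
          exact innerF0 (clean_tag t) (PySem.Set.add st.1 (clean_tag t)) st.2
        · simp only [if_neg hl])]
    rw [show (PySem.Set.empty, PySem.Set.empty)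
        = (([] : PySem.Set String), ([] : PySem.Set String)) from rfl]
    rw [outerSimpF ts [] []]
    simp only [PySem.Set.update_nil_left]
    rw [discard_foldl, ofList_filter]
    apply List.filter_congr
    intro x _
    rw [contains_bad_eq]
  · -- include_folders = true
    simp only [if_true, hws]
    rw [PySem.List.foldl_congr_mem ts _
      (fun (st : PySem.Set String × PySem.Set String) t =>
        if PySem.Str.len (clean_tag t) > 0 then
          (PySem.Set.update (PySem.Set.add st.1 (clean_tag t)) (prefRec (clean_tag t).toList []), st.2)
        else st)
      (PySem.Set.empty, PySem.Set.empty)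
      (by
        intro st t _
        by_cases hl : PySem.Str.len (clean_tag t) > 0
        · simp only [if_pos hl, if_true]
          exact innerT0 (clean_tag t) (PySem.Set.add st.1 (clean_tag t)) st.2
        · simp only [if_neg hl])]
    rw [show (PySem.Set.empty, PySem.Set.empty)
        = (([] : PySem.Set String), ([] : PySem.Set String)) from rfl]
    rw [outerSimpT ts [] []]
    simp only [PySem.Set.update_nil_left]
    simp only [folders_eq]
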